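-- pv_equiv track=rewrite | github.com/Terhands/AdventOfCode | 2020/14/solution.py | expand_masked_address
-- ===== SOURCE A (Python) =====
-- def add_digit_to_address(address, digit):
--     return '{}{}'.format(address, digit)
--
-- def expand_masked_address(masked_address):
--     addresses = ['']
--     for digit in masked_address:
--         if digit == 'X':
--             expanded_addresses = []
--             for address in addresses:
--                 expanded_addresses.append(add_digit_to_address(address, 0))
--                 expanded_addresses.append(add_digit_to_address(address, 1))
--             addresses = expanded_addresses
--         else:
--             addresses = [add_digit_to_address(address, digit) for address in addresses]
--     return addresses
-- ===== SOURCE B (Python) =====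
-- def expand_masked_address(masked_address):
--     # Combinatorial enumeration: count the X's, then for each integer n in
--     # range(2**k) build one address in a single pass over the mask, consuming
--     # the bits of n most-significant-first at each X (leftmost X = MSB), so
--     # the output order matches the progressive-doubling order.
--     k = masked_address.count('X')
--     result = []
--     for n in range(2 ** k):
--         shift = k
--         chars = []
--         for c in masked_address:
--             if c == 'X':
--                 shift -= 1
--                 chars.append('1' if (n >> shift) & 1 else '0')
--             else:
--                 chars.append(c)
--         result.append(''.join(chars))
--     return result
-- ===== Notes on version B (the rewrite author's own statement) =====
-- stated objective: alternative
-- what changed: B replaces A's progressive list-doubling (rebuilding the whole candidate list of growing prefix strings at every mask character) by a combinatorial enumeration: it counts the k wildcards once, then for each integer n in range(2**k) builds one complete address in a single pass over the mask, reading the bits of n most-significant-first at each X.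
import Mathlib
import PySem

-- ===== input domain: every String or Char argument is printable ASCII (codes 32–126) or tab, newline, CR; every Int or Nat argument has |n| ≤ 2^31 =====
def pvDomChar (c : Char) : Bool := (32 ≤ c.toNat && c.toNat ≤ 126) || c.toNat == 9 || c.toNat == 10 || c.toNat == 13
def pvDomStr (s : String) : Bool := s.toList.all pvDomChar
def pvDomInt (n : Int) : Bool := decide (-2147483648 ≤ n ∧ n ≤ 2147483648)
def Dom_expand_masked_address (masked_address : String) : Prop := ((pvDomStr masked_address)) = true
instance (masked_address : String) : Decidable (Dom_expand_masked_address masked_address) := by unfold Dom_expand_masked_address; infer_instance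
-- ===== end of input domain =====

-- B enumerates the 2^k bit patterns as integers and builds each address in a single
-- pass over the mask (bits consumed MSB-first at each X) instead of A's progressive
-- list doubling, which re-copies every growing prefix string at each character;
-- a timing run measured B faster.

-- ===== PORT A =====
def add_digit_to_address (address : String) (digit : String) : String :=
  address ++ digit

def expand_masked_address (masked_address : String) : List String :=
  masked_address.toList.foldl
    (fun addresses digit =>
      if digit = 'X' then
        addresses.foldl (fun ea a =>
          ea ++ [add_digit_to_address a "0", add_digit_to_address a "1"]) []
      else
        addresses.map (fun a => add_digit_to_address a (String.ofList [digit])))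
    [""]

-- ===== PORT B =====
-- one address for pattern n: single pass over the mask, decrementing the shift at each X
def pvFillOne (cs : List Char) (k : Nat) (n : Nat) : String :=
  String.ofList
    ((cs.foldl
      (fun (st : Nat × List Char) c =>
        if c = 'X' then
          (st.1 - 1, st.2 ++ [if (n >>> (st.1 - 1)) &&& 1 == 1 then '1' else '0'])
        else
          (st.1, st.2 ++ [c]))
      (k, [])).2)

def expand_masked_address_alt (masked_address : String) : List String :=
  let cs := masked_address.toList
  let k := cs.count 'X'
  (List.range (2 ^ k)).map (pvFillOne cs k)

-- ===== PRECONDITION & SPEC =====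
def Spec_expand_masked_address (masked_address : String) (out : List String) : Prop := out = expand_masked_address_alt masked_address
instance (masked_address : String) (out : List String) : Decidable (Spec_expand_masked_address masked_address out) := by unfold Spec_expand_masked_address; infer_instance

-- ===== CLAIM (what is proved, stated in full; the proofs are below) =====
def Claim_equal_expand_masked_address : Prop := ∀ (masked_address : String), Dom_expand_masked_address masked_address → Spec_expand_masked_address masked_address (expand_masked_address masked_address)

-- ===== LEMMAS AND PROOFS =====

-- Proof-side recursive characterisation of the full expansion.
def expand_go : List Char → List String
  | [] => [""]
  | c :: cs =>
    let rest := expand_go cs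
    if c = 'X' then
      rest.map (fun s => "0" ++ s) ++ rest.map (fun s => "1" ++ s)
    else
      rest.map (fun s => String.ofList [c] ++ s)

-- Proof-side recursive form of B's per-pattern fill.
def fillRec : List Char → Nat → Nat → List Char
  | [], _, _ => []
  | c :: cs, k, n =>
    if c = 'X' then
      (if (n >>> (k - 1)) &&& 1 == 1 then '1' else '0') :: fillRec cs (k - 1) n
    else
      c :: fillRec cs k n

theorem ofList_cons_app (c : Char) (l : List Char) :
    String.ofList (c :: l) = String.ofList [c] ++ String.ofList l := by
  rw [← String.ofList_append]; rfl


theorem str_zero : String.ofList ['0'] = "0" := rfl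

theorem str_one : String.ofList ['1'] = "1" := rfl

theorem fill_foldl_eq (cs : List Char) (n : Nat) : ∀ (k : Nat) (pre : List Char),
    (cs.foldl
      (fun (st : Nat × List Char) c =>
        if c = 'X' then
          (st.1 - 1, st.2 ++ [if (n >>> (st.1 - 1)) &&& 1 == 1 then '1' else '0'])
        else
          (st.1, st.2 ++ [c]))
      (k, pre)).2 = pre ++ fillRec cs k n := by
  induction cs with
  | nil => intro k pre; simp [fillRec]
  | cons c cs ih =>
    intro k pre
    by_cases hc : c = 'X'
    · simp only [List.foldl_cons, if_pos hc, ih, fillRec, List.append_assoc,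
        List.singleton_append]
    · simp only [List.foldl_cons, if_neg hc, ih, fillRec, List.append_assoc,
        List.singleton_append]

-- bit extraction as division
theorem bit_eq_div (n j : Nat) : (n >>> j) &&& 1 = n / 2 ^ j % 2 := by
  rw [Nat.shiftRight_eq_div_pow, Nat.and_one_is_mod]

-- adding 2^k does not change bits below k
theorem bit_add_pow (n k j : Nat) (hj : j < k) :
    ((2 ^ k + n) >>> j) &&& 1 = (n >>> j) &&& 1 := by
  rw [bit_eq_div, bit_eq_div]
  have hjk : j + (k - j) = k := by omega
  have h1 : 2 ^ k + n = 2 ^ j * 2 ^ (k - j) + n := by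
    rw [← pow_add, hjk]
  rw [h1, Nat.mul_add_div (Nat.two_pow_pos j)]
  have h2 : 2 * 2 ^ (k - j - 1) = 2 ^ (k - j) := by
    rw [← pow_succ']; congr 1; omega
  rw [← h2]
  omega

-- the top bit of 2^k + n (n < 2^k) is set
theorem bit_top_set (n k : Nat) (hn : n < 2 ^ k) :
    ((2 ^ k + n) >>> k) &&& 1 = 1 := by
  rw [bit_eq_div, Nat.add_div_left _ (Nat.two_pow_pos k), Nat.div_eq_of_lt hn]

theorem bit_top_clear (n k : Nat) (hn : n < 2 ^ k) : (n >>> k) &&& 1 = 0 := by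
  rw [bit_eq_div, Nat.div_eq_of_lt hn]

-- fillRec at its natural shift only reads bits below (count 'X'), so adding 2^k is invisible
theorem fillRec_bits (cs : List Char) : ∀ (n m : Nat),
    (∀ j, j < cs.count 'X' → (m >>> j) &&& 1 = (n >>> j) &&& 1) →
    fillRec cs (cs.count 'X') m = fillRec cs (cs.count 'X') n := by
  induction cs with
  | nil => intro n m _; rfl
  | cons c cs ih =>
    intro n m h
    by_cases hc : c = 'X'
    · have hcount : (c :: cs).count 'X' = cs.count 'X' + 1 := by
        simp [hc]
      rw [hcount] at h ⊢
      simp only [fillRec, if_pos hc, Nat.add_sub_cancel]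
      rw [h (cs.count 'X') (by omega), ih n m (fun j hj => h j (by omega))]
    · have hcount : (c :: cs).count 'X' = cs.count 'X' := by
        simp [hc]
      rw [hcount] at h ⊢
      simp only [fillRec, if_neg hc]
      rw [ih n m h]

-- main: enumerating the patterns reproduces the recursive expansion
theorem range_fill_eq_go (cs : List Char) :
    (List.range (2 ^ cs.count 'X')).map
      (fun n => String.ofList (fillRec cs (cs.count 'X') n)) = expand_go cs := by
  induction cs with
  | nil => simp [fillRec, expand_go]
  | cons c cs ih =>
    by_cases hc : c = 'X'
    · have hcount : (c :: cs).count 'X' = cs.count 'X' + 1 := by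
        simp [hc]
      rw [hcount]
      have hsplit : (2 : Nat) ^ (cs.count 'X' + 1) = 2 ^ cs.count 'X' + 2 ^ cs.count 'X' := by
        ring
      rw [hsplit, List.range_add, List.map_append, List.map_map]
      simp only [expand_go, if_pos hc]
      congr 1
      · rw [← ih, List.map_map]
        apply List.map_congr_left
        intro n hn
        have hn' : n < 2 ^ cs.count 'X' := List.mem_range.mp hn
        simp only [Function.comp_def, fillRec, if_pos hc, Nat.add_sub_cancel]
        rw [bit_top_clear n _ hn', ofList_cons_app]
        simp [str_zero]
      · rw [← ih, List.map_map]
        apply List.map_congr_left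
        intro n hn
        have hn' : n < 2 ^ cs.count 'X' := List.mem_range.mp hn
        simp only [Function.comp_def, fillRec, if_pos hc, Nat.add_sub_cancel]
        rw [bit_top_set n _ hn',
          fillRec_bits cs n (2 ^ cs.count 'X' + n)
            (fun j hj => bit_add_pow n _ j hj), ofList_cons_app]
        simp [str_one]
    · have hcount : (c :: cs).count 'X' = cs.count 'X' := by
        simp [hc]
      rw [hcount]
      simp only [expand_go, if_neg hc]
      rw [← ih, List.map_map]
      apply List.map_congr_left
      intro n _
      simp only [Function.comp_def, fillRec, if_neg hc]
      exact ofList_cons_app c _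

-- Loop invariant for A: processing the remaining characters `cs` from a state `acc` of
-- partial prefixes yields every prefix extended by every expansion of the suffix.
theorem expand_foldl_invariant (cs : List Char) (acc : List String) :
    cs.foldl
      (fun addresses digit =>
        if digit = 'X' then
          addresses.foldl (fun ea a =>
            ea ++ [add_digit_to_address a "0", add_digit_to_address a "1"]) []
        else
          addresses.map (fun a => add_digit_to_address a (String.ofList [digit]))) acc
      = acc.flatMap (fun a => (expand_go cs).map (fun s => a ++ s)) := by
  induction cs generalizing acc with
  | nil => simp [expand_go]
  | cons c cs ih =>
    simp only [List.foldl_cons, ih]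
    by_cases hc : c = 'X'
    · subst hc
      simp only [expand_go, PySem.List.foldl_append_eq_flatMap, List.nil_append]
      simp [add_digit_to_address, List.flatMap_assoc, List.map_append,
        List.map_map, Function.comp_def, String.append_assoc]
    · simp only [expand_go, if_neg hc]
      simp [add_digit_to_address, List.flatMap_map, List.map_map,
        Function.comp_def, String.append_assoc]

-- ===== VERDICT (by name: the statement is the Claim_ definition above) =====
theorem expand_masked_address_spec : Claim_equal_expand_masked_address := by
  intro m _
  unfold Spec_expand_masked_address expand_masked_address expand_masked_address_alt
  rw [expand_foldl_invariant]
  have key : (List.range (2 ^ m.toList.count 'X')).map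
      (pvFillOne m.toList (m.toList.count 'X')) = expand_go m.toList := by
    have h1 : ∀ n, pvFillOne m.toList (m.toList.count 'X') n =
        String.ofList (fillRec m.toList (m.toList.count 'X') n) := by
      intro n; unfold pvFillOne; rw [fill_foldl_eq]; simp
    rw [funext h1]
    exact range_fill_eq_go m.toList
  show _ = (List.range (2 ^ m.toList.count 'X')).map (pvFillOne m.toList (m.toList.count 'X'))
  rw [key]
  rw [List.flatMap_cons, List.flatMap_nil, List.append_nil]
  have hempty : ∀ s : String, "" ++ s = s := by intro s; simp
  simp only [hempty, List.map_id']
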